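-- pv_equiv track=rewrite | github.com/rossmason/glu | src/python/glu/render/htmlrenderer.py | __render_breadcrums
-- ===== SOURCE A (Python) =====
-- def __render_breadcrums(breadcrums):
--     """
--     Output HTML for breadcrums.
--
--     Breadcrums are given as a list of tuples, with each tuple containing
--     a (name,URI). The last breadcrum should not be rendered as a clickable
--     link.
--
--     @param breadcrums:    List of breadcrums.
--     @type breadcrums:     list
--
--     @return:              HTML for breadcrums.
--     @rtype:               string
--
--     """
--     segments = []
--     for i, elem in enumerate(breadcrums):
--         name, uri = elem
--         if i < len(breadcrums)-1:
--             # All but the last element are rendered as clickable links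
--             segments.append('<a href="%s">%s</a>' % (uri, name))
--         else:
--             segments.append(name)
--     return " > ".join(segments)
-- ===== SOURCE B (Python) =====
-- def __render_breadcrums(breadcrums):
--     out = None
--     for name, uri in reversed(breadcrums):
--         if out is None:
--             out = name
--         else:
--             out = '<a href="%s">%s</a> > ' % (uri, name) + out
--     return out if out is not None else ""
-- ===== Notes on version B (the rewrite author's own statement) =====
-- stated objective: alternative
-- what changed: Replaces A's forward indexed loop that accumulates a segments list and joins it at the end by a backward traversal (reversed list) that builds the result string directly in one accumulator: the first element seen becomes the plain tail name, every later one prepends its link and ' > '.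
import Mathlib
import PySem

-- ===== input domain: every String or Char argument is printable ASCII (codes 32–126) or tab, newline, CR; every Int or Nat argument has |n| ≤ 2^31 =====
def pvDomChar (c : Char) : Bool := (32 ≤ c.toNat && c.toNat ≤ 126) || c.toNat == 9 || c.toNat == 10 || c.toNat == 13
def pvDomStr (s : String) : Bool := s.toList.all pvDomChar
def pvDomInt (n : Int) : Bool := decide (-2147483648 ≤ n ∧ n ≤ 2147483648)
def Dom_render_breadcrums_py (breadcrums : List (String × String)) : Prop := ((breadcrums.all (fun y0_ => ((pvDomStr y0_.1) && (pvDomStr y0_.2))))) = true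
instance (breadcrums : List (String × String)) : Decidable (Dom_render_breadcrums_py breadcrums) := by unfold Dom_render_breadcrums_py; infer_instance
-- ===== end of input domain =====

-- B replaces A's forward indexed loop that accumulates a segments list and joins it at the end
-- by a backward traversal (reversed list) building the result string in one accumulator — objective: alternative.

-- ===== PORT A =====
def render_breadcrums_py (breadcrums : List (String × String)) : String :=
  let segments : List String :=
    (PySem.List.enumerate breadcrums).foldl
      (fun segs p =>
        let i := p.1
        let name := p.2.1
        let uri := p.2.2
        if i < (breadcrums.length : Int) - 1 then
          segs ++ ["<a href=\"" ++ uri ++ "\">" ++ name ++ "</a>"]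
        else
          segs ++ [name]) []
  PySem.Str.join " > " segments

-- ===== PORT B =====
def render_breadcrums_py_alt (breadcrums : List (String × String)) : String :=
  let out : Option String :=
    breadcrums.reverse.foldl
      (fun out p =>
        match out with
        | none => some p.1
        | some o => some ("<a href=\"" ++ p.2 ++ "\">" ++ p.1 ++ "</a> > " ++ o))
      none
  out.getD ""

-- ===== PRECONDITION & SPEC =====
def Spec_render_breadcrums_py (breadcrums : List (String × String)) (out : String) : Prop := out = render_breadcrums_py_alt breadcrums
instance (breadcrums : List (String × String)) (out : String) : Decidable (Spec_render_breadcrums_py breadcrums out) := by unfold Spec_render_breadcrums_py; infer_instance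

-- ===== CLAIM (what is proved, stated in full; the proofs are below) =====
def Claim_equal_render_breadcrums_py : Prop := ∀ (breadcrums : List (String × String)), Dom_render_breadcrums_py breadcrums → Spec_render_breadcrums_py breadcrums (render_breadcrums_py breadcrums)

-- ===== LEMMAS AND PROOFS =====

-- proof helper: the link string A builds for one (name, uri) pair
def pvLink (p : String × String) : String :=
  "<a href=\"" ++ p.2 ++ "\">" ++ p.1 ++ "</a>"

-- proof helper: A's segments list in closed form — links for all but the last, the last plain name appended
def pvSegs (bc : List (String × String)) : List String :=
  match bc.getLast? with
  | some (name, _) => bc.dropLast.map pvLink ++ [name]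
  | none => bc.dropLast.map pvLink

-- proof helper: the result as a structural recursion, the bridge between the two ports
def pvRec : List (String × String) → String
  | [] => ""
  | (name, uri) :: rest =>
    match rest with
    | [] => name
    | _ :: _ => "<a href=\"" ++ uri ++ "\">" ++ name ++ "</a> > " ++ pvRec rest

lemma pv_segments_eq (bc : List (String × String)) :
    (PySem.List.enumerate bc).foldl
      (fun segs p =>
        let i := p.1
        let name := p.2.1
        let uri := p.2.2
        if i < (bc.length : Int) - 1 then
          segs ++ ["<a href=\"" ++ uri ++ "\">" ++ name ++ "</a>"]
        else
          segs ++ [name]) [] = pvSegs bc := by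
  unfold pvSegs
  rcases List.eq_nil_or_concat bc with rfl | ⟨xs, x, rfl⟩
  · simp [PySem.List.enumerate]
  · rw [List.concat_eq_append, PySem.List.enumerate_append, List.foldl_append]
    have hlen : (xs ++ [x]).length = xs.length + 1 := by simp
    have h1 :
        (PySem.List.enumerate xs 0).foldl
          (fun segs p =>
            let i := p.1
            let name := p.2.1
            let uri := p.2.2
            if i < ((xs ++ [x]).length : Int) - 1 then
              segs ++ ["<a href=\"" ++ uri ++ "\">" ++ name ++ "</a>"]
            else
              segs ++ [name]) [] =
        xs.map pvLink := by
      show (PySem.List.enumerate xs 0).foldl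
          (fun segs p =>
            if p.1 < ((xs ++ [x]).length : Int) - 1 then
              segs ++ ["<a href=\"" ++ p.2.2 ++ "\">" ++ p.2.1 ++ "</a>"]
            else
              segs ++ [p.2.1]) [] = xs.map pvLink
      rw [PySem.List.foldl_congr_mem (PySem.List.enumerate xs (0 : Int))
        (fun segs p =>
            if p.1 < ((xs ++ [x]).length : Int) - 1 then
              segs ++ ["<a href=\"" ++ p.2.2 ++ "\">" ++ p.2.1 ++ "</a>"]
            else
              segs ++ [p.2.1])
        (fun segs p => segs ++ [pvLink p.2]) []
        (by
          intro acc p hp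
          rcases (PySem.List.mem_enumerate_iff _ _ _).1 hp with ⟨k, hk, rfl⟩
          have hklt : ((0 : Int) + k) < ((xs ++ [x]).length : Int) - 1 := by
            simp [hlen]; exact_mod_cast hk
          simp only [hklt, if_pos]
          rfl)]
      rw [PySem.List.foldl_append_eq_flatMap]
      simp only [List.nil_append]
      rw [← List.map_eq_flatMap]
      have := PySem.List.map_snd_enumerate xs (0 : Int)
      calc (PySem.List.enumerate xs 0).map (fun p => pvLink p.2)
          = ((PySem.List.enumerate xs 0).map (·.2)).map pvLink := by
            rw [List.map_map]; rfl
        _ = xs.map pvLink := by rw [this]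
    rw [h1]
    simp [PySem.List.enumerate]

lemma pv_join_segs (bc : List (String × String)) :
    PySem.Str.join " > " (pvSegs bc) = pvRec bc := by
  induction bc with
  | nil =>
    show String.ofList ([' ', '>', ' '].intercalate []) = pvRec []
    decide
  | cons hd tl ih =>
    obtain ⟨name, uri⟩ := hd
    cases tl with
    | nil =>
      simp [pvSegs, pvRec, PySem.Str.join, PySem.Chars.join_singleton]
    | cons y ys =>
      have hsegs : pvSegs ((name, uri) :: y :: ys) = pvLink (name, uri) :: pvSegs (y :: ys) := by
        unfold pvSegs
        rcases h : (y :: ys).getLast? with _ | ⟨m, u⟩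
        · simp at h
        · simp [List.getLast?_cons_cons, h, List.dropLast_cons_of_ne_nil]
      have hne : pvSegs (y :: ys) ≠ [] := by
        unfold pvSegs
        rcases h : (y :: ys).getLast? with _ | ⟨m, u⟩
        · simp at h
        · simp
      rw [hsegs]
      obtain ⟨s, ss, hss⟩ : ∃ s ss, pvSegs (y :: ys) = s :: ss := by
        cases h : pvSegs (y :: ys) with
        | nil => exact absurd h hne
        | cons s ss => exact ⟨s, ss, rfl⟩
      rw [hss]
      have : PySem.Str.join " > " (pvLink (name, uri) :: s :: ss)
          = pvLink (name, uri) ++ " > " ++ PySem.Str.join " > " (s :: ss) := by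
        simp only [PySem.Str.join, List.map_cons, PySem.Chars.join_cons_cons]
        rw [String.ofList_append, String.ofList_append]
        simp
      rw [this, ← hss, ih]
      show pvLink (name, uri) ++ " > " ++ pvRec (y :: ys)
          = pvRec ((name, uri) :: y :: ys)
      simp [pvLink, pvRec, String.append_assoc]

-- the fold step of B, as used after List.foldl_reverse
def pvStep (p : String × String) (out : Option String) : Option String :=
  match out with
  | none => some p.1
  | some o => some ("<a href=\"" ++ p.2 ++ "\">" ++ p.1 ++ "</a> > " ++ o)

lemma pv_foldr_rec (bc : List (String × String)) (h : bc ≠ []) :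
    bc.foldr pvStep none = some (pvRec bc) := by
  induction bc with
  | nil => exact absurd rfl h
  | cons hd tl ih =>
    obtain ⟨name, uri⟩ := hd
    cases tl with
    | nil => simp [pvStep, pvRec]
    | cons y ys =>
      rw [List.foldr_cons, ih (by simp)]
      simp [pvStep, pvRec]

lemma pv_alt_eq_rec (bc : List (String × String)) :
    render_breadcrums_py_alt bc = pvRec bc := by
  unfold render_breadcrums_py_alt
  rw [List.foldl_reverse]
  have hfun : (fun (out : Option String) (p : String × String) =>
      match out with
      | none => some p.1
      | some o => some ("<a href=\"" ++ p.2 ++ "\">" ++ p.1 ++ "</a> > " ++ o)) =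
      (fun out p => pvStep p out) := rfl
  cases bc with
  | nil => simp [pvRec]
  | cons hd tl =>
    show ((hd :: tl).foldr (fun p out => pvStep p out) none).getD "" = pvRec (hd :: tl)
    rw [show (fun (p : String × String) (out : Option String) => pvStep p out) = pvStep from rfl]
    rw [pv_foldr_rec _ (by simp)]
    rfl

-- ===== VERDICT (by name: the statement is the Claim_ definition above) =====
theorem render_breadcrums_py_spec : Claim_equal_render_breadcrums_py := by
  intro bc _
  unfold Spec_render_breadcrums_py render_breadcrums_py
  rw [pv_segments_eq, pv_join_segs, ← pv_alt_eq_rec]
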